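-- pv_equiv track=rewrite | github.com/jinhyuk9714/songsim-campus-mcp | src/songsim_campus/profile_meal_runtime.py | _period_start_minutes
-- ===== SOURCE A (Python) =====
-- def _period_start_minutes(period: int | None) -> int | None:
--     if period is None:
--         return None
--     class_periods = [
--         (1, "09:00"),
--         (2, "10:00"),
--         (3, "11:00"),
--         (4, "12:00"),
--         (5, "13:00"),
--         (6, "14:00"),
--         (7, "15:00"),
--         (8, "16:00"),
--         (9, "17:00"),
--         (10, "18:00"),
--     ]
--     for item_period, start in class_periods:
--         if item_period == period:
--             hour, minute = start.split(":")
--             return int(hour) * 60 + int(minute)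
--     return None
-- ===== SOURCE B (Python) =====
-- def _period_start_minutes(period):
--     if period is None:
--         return None
--     if period not in range(1, 11):
--         return None
--     return (8 + period) * 60
-- ===== Notes on version B (the rewrite author's own statement) =====
-- stated objective: simpler
-- what changed: Replaces the ten-entry (period, "HH:MM") table scan and string parsing with a range check and the closed-form formula (8 + period) * 60.
import Mathlib
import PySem

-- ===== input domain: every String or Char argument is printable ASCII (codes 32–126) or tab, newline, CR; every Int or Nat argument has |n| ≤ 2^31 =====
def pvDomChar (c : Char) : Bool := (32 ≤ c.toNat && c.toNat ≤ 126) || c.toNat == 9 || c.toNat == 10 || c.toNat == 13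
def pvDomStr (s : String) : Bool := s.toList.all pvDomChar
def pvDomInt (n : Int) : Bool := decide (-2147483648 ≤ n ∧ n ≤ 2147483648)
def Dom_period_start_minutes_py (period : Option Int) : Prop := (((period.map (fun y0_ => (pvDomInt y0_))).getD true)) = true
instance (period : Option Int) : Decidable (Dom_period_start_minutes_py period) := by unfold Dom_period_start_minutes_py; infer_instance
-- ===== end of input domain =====

-- B replaces A's (period, "HH:MM") table scan and string parsing with a range check and the closed-form (8 + period) * 60; objective: simpler.


-- ===== PORT A =====
-- the loop over the literal table; string parsing via PySem.Str.split / PySem.Int.ofStr? (exact on this ASCII table)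
def periodStartLoop (period : Int) : List (Int × String) → Option Int
  | [] => none
  | (item_period, start) :: rest =>
    if item_period == period then
      match PySem.Str.split? start ":" with
      | some [hour, minute] =>
        match PySem.Int.ofStr? hour, PySem.Int.ofStr? minute with
        | some h, some m => some (h * 60 + m)
        | _, _ => none
      | _ => none
    else periodStartLoop period rest

def period_start_minutes_py (period : Option Int) : Option Int :=
  match period with
  | none => none
  | some p =>
    periodStartLoop p
      [(1, "09:00"), (2, "10:00"), (3, "11:00"), (4, "12:00"), (5, "13:00"),
       (6, "14:00"), (7, "15:00"), (8, "16:00"), (9, "17:00"), (10, "18:00")]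

-- ===== PORT B =====
def period_start_minutes_py_alt (period : Option Int) : Option Int :=
  match period with
  | none => none
  | some p => if 1 ≤ p ∧ p ≤ 10 then some ((8 + p) * 60) else none

-- ===== PRECONDITION & SPEC =====
def Spec_period_start_minutes_py (period : Option Int) (out : Option Int) : Prop := out = period_start_minutes_py_alt period
instance (period : Option Int) (out : Option Int) : Decidable (Spec_period_start_minutes_py period out) := by unfold Spec_period_start_minutes_py; infer_instance

-- ===== CLAIM =====
def Claim_equal_period_start_minutes_py : Prop := ∀ (period : Option Int), Dom_period_start_minutes_py period → Spec_period_start_minutes_py period (period_start_minutes_py period)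

-- ===== LEMMAS AND PROOFS =====
theorem periodStart_some (p : Int) (h1 : 1 ≤ p) (h10 : p ≤ 10) :
    period_start_minutes_py (some p) = some ((8 + p) * 60) := by
  interval_cases p <;> decide

theorem periodStart_none (p : Int) (h : ¬(1 ≤ p ∧ p ≤ 10)) :
    period_start_minutes_py (some p) = none := by
  simp only [period_start_minutes_py, periodStartLoop]
  have h1 : (1 : Int) ≠ p := by omega
  have h2 : (2 : Int) ≠ p := by omega
  have h3 : (3 : Int) ≠ p := by omega
  have h4 : (4 : Int) ≠ p := by omega
  have h5 : (5 : Int) ≠ p := by omega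
  have h6 : (6 : Int) ≠ p := by omega
  have h7 : (7 : Int) ≠ p := by omega
  have h8 : (8 : Int) ≠ p := by omega
  have h9 : (9 : Int) ≠ p := by omega
  have h10 : (10 : Int) ≠ p := by omega
  simp [h1, h2, h3, h4, h5, h6, h7, h8, h9, h10]

-- ===== VERDICT =====
theorem period_start_minutes_py_spec : Claim_equal_period_start_minutes_py := by
  intro period _
  unfold Spec_period_start_minutes_py period_start_minutes_py_alt
  match period with
  | none => rfl
  | some p =>
    by_cases h : 1 ≤ p ∧ p ≤ 10
    · simp only [h]
      exact periodStart_some p h.1 h.2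
    · simp only [h, if_neg, not_false_iff]
      exact periodStart_none p h
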